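-- pv_equiv track=rewrite | github.com/TStesh/MiniGames | Bubbles/bubbles.py | check_vector
-- ===== SOURCE A (Python) =====
-- SAME_BALLS = 5
--
-- def find_all_substrings(src_str):
--     res = {}
--     for c in set(src_str):
--         if c == '-':
--             continue
--         z = [x for x in enumerate(src_str) if x[1] == c]
--         s = []
--         trigger = True
--         for i in range(z[0][0], z[-1][0] + 1):
--             if (i, c) in z:
--                 if trigger:
--                     s.append(i)
--                     s.append(i)
--                     trigger = False
--                 s.pop()
--                 s.append(i)
--             else:
--                 trigger = True
--         norm_s = []
--         for i in range(0, len(s), 2):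
--             norm_s.append((s[i], s[i + 1]))
--         res[c] = norm_s
--     return res
--
-- def check_vector(vec):
--     v = []
--     # нормализация
--     t = str(vec).replace('-2', '-').replace('[', '').replace(']', '').replace(',', '').replace(' ', '')
--     r = find_all_substrings(t)
--     for x in r.keys():
--         for _ in r[x]:
--             ix, iy = _[0], _[1]
--             if iy - ix + 1 >= SAME_BALLS:
--                 for idx in range(ix, iy + 1):
--                     v.append(idx)
--     return v
-- ===== SOURCE B (Python) =====
-- SAME_BALLS = 5
--
-- def check_vector(vec):
--     # same normalization as A (string munging, not the algorithmic content)
--     t = str(vec).replace('-2', '-').replace('[', '').replace(']', '').replace(',', '').replace(' ', '')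
--     v = []
--     i, n = 0, len(t)
--     while i < n:
--         j = i + 1
--         while j < n and t[j] == t[i]:
--             j += 1
--         if t[i] != '-' and j - i >= SAME_BALLS:
--             v.extend(range(i, j))
--         i = j
--     return v
-- ===== Notes on version B (the rewrite author's own statement) =====
-- stated objective: faster
-- what changed: A builds, per distinct character, an occurrence list and re-scans it with a quadratic '(i, c) in z' membership test inside a trigger/pop loop plus a dict of pairs; B makes one linear two-pointer pass over the normalized string, emitting each maximal run's indices of length >= 5 directly in positional order.
import Mathlib
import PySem

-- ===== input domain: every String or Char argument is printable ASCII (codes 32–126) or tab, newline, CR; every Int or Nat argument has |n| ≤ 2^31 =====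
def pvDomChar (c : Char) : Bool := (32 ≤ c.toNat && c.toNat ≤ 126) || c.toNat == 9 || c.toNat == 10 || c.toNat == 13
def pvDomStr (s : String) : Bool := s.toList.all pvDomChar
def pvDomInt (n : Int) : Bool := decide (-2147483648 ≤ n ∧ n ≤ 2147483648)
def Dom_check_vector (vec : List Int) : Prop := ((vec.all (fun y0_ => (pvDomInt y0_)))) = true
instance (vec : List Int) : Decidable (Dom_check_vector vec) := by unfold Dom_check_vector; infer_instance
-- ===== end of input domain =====

-- B is a single linear pass over the normalized string instead of A's per-character
-- occurrence-list rescans; objective: faster (a timing run measures it).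

def SAME_BALLS : Int := 5

-- shared normalization (both Pythons compute the very same line):
-- t = str(vec).replace('-2','-').replace('[','').replace(']','').replace(',','').replace(' ','')
def normChars (vec : List Int) : List Char :=
  let s : List Char := ['['] ++ PySem.Chars.join [',', ' '] (vec.map PySem.Int.toChars) ++ [']']
  PySem.Chars.replace (PySem.Chars.replace (PySem.Chars.replace (PySem.Chars.replace
    (PySem.Chars.replace s ['-', '2'] ['-']) ['['] []) [']'] []) [','] []) [' '] []

-- ===== PORT A =====
-- one iteration of find_all_substrings' outer `for c in set(src_str)` loop
def fasStep (t : List Char) (res : PySem.Dict Char (List (Int × Int))) (c : Char) :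
    PySem.Dict Char (List (Int × Int)) :=
  if c = '-' then res
  else
    let z := (PySem.List.enumerate t 0).filter (fun x => x.2 == c)
    match PySem.List.pyGet? z 0, PySem.List.pyGet? z (-1) with
    | some z0, some zl =>
      let st := (PySem.List.pyRange z0.1 (zl.1 + 1) 1).foldl
        (fun (st : List Int × Bool) i =>
          if z.contains (i, c) then
            let s := if st.2 then st.1 ++ [i, i] else st.1
            -- s.pop(); s.append(i) — s is provably nonempty at the pop, so dropLast is exact
            (s.dropLast ++ [i], false)
          else (st.1, true))
        ([], true)
      let s := st.1
      let norm_s := (PySem.List.pyRange 0 (s.length : Int) 2).foldl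
        (fun acc i => acc ++ [(PySem.List.pyGetD s i 0, PySem.List.pyGetD s (i + 1) 0)]) []
      res.insert c norm_s
    | _, _ => res   -- unreachable: c ∈ set(src_str) means z is nonempty

def find_all_substrings (t : List Char) : PySem.Dict Char (List (Int × Int)) :=
  (PySem.Set.ofList t).foldl (fasStep t) PySem.Dict.empty

def check_vector (vec : List Int) : List Int :=
  let t := normChars vec
  let r := find_all_substrings t
  r.keys.foldl (fun v x =>
    (r.getD x []).foldl (fun v p =>
      if p.2 - p.1 + 1 ≥ SAME_BALLS then
        (PySem.List.pyRange p.1 (p.2 + 1) 1).foldl (fun v idx => v ++ [idx]) v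
      else v) v) []

-- ===== PORT B =====
def leadRun (c : Char) : List Char → Nat
  | [] => 0
  | x :: xs => if x = c then leadRun c xs + 1 else 0

def scanRuns : List Char → Int → List Int
  | [], _ => []
  | c :: rest, i =>
    let k := leadRun c rest
    (if c ≠ '-' ∧ (k : Int) + 1 ≥ SAME_BALLS then PySem.List.pyRange i (i + k + 1) 1 else [])
      ++ scanRuns (rest.drop k) (i + (k : Int) + 1)
termination_by l _ => l.length
decreasing_by simp [List.length_drop]

def check_vector_alt (vec : List Int) : List Int := scanRuns (normChars vec) 0

-- ===== PRECONDITION & SPEC =====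
-- Pre_ excludes inputs whose normalized string has runs of length ≥ 5 of TWO OR MORE distinct
-- non-'-' characters: there A's output block order follows Python's hash-randomized set
-- iteration order, which is not a function of the input (B uses positional order).
def Pre_check_vector (vec : List Int) : Prop :=
  ((PySem.Set.ofList (normChars vec)).filter
    (fun c => c != '-' && PySem.Chars.isIn (List.replicate 5 c) (normChars vec))).length ≤ 1
instance (vec : List Int) : Decidable (Pre_check_vector vec) := by
  unfold Pre_check_vector; infer_instance

def pvWitness_check_vector : List Int := [1, 1, 1, 1, 1]

def Spec_check_vector (vec : List Int) (out : List Int) : Prop := out = check_vector_alt vec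
instance (vec : List Int) (out : List Int) : Decidable (Spec_check_vector vec out) := by
  unfold Spec_check_vector; infer_instance

-- ===== CLAIM (what is proved, stated in full; the proofs are below) =====
def Claim_equal_check_vector : Prop :=
  ∀ (vec : List Int), Dom_check_vector vec → Pre_check_vector vec →
    Spec_check_vector vec (check_vector vec)

-- ===== LEMMAS AND PROOFS =====

-- maximal runs of t, positionally: (char, first index, last index)
def runsSpec : List Char → Int → List (Char × Int × Int)
  | [], _ => []
  | c :: rest, i =>
    let k := leadRun c rest
    (c, i, i + k) :: runsSpec (rest.drop k) (i + (k : Int) + 1)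
termination_by l _ => l.length
decreasing_by simp [List.length_drop]

-- the indices a qualifying run contributes
def qual (r : Char × Int × Int) : List Int :=
  if r.1 ≠ '-' ∧ r.2.2 - r.2.1 + 1 ≥ 5 then PySem.List.pyRange r.2.1 (r.2.2 + 1) 1 else []

-- the pairs A stores for character c
def pairsOf (t : List Char) (c : Char) : List (Int × Int) :=
  (runsSpec t 0).filterMap (fun r => if r.1 = c then some r.2 else none)

-- pair-level model of A's trigger/pop loop state
def stepPair (P : Int → Bool) (st : List (Int × Int) × Option (Int × Int)) (i : Int) :
    List (Int × Int) × Option (Int × Int) :=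
  if P i then
    (st.1, some (match st.2 with | none => (i, i) | some q => (q.1, i)))
  else (st.1 ++ st.2.toList, none)

def flatP (ps : List (Int × Int)) : List Int := ps.flatMap (fun p => [p.1, p.2])

lemma leadRun_le (c : Char) (l : List Char) : leadRun c l ≤ l.length := by
  induction l with
  | nil => simp [leadRun]
  | cons x xs ih => simp [leadRun]; split <;> omega

lemma leadRun_take (c : Char) (l : List Char) :
    l.take (leadRun c l) = List.replicate (leadRun c l) c := by
  induction l with
  | nil => simp [leadRun]
  | cons x xs ih =>
    simp only [leadRun]
    split
    · next h => simp [List.replicate_succ, h, ih]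
    · simp

lemma leadRun_drop_head (c : Char) (l : List Char) (x : Char)
    (h : (l.drop (leadRun c l)).head? = some x) : x ≠ c := by
  induction l with
  | nil => simp [leadRun] at h
  | cons y ys ih =>
    by_cases hy : y = c
    · simp only [leadRun, if_pos hy, List.drop_succ_cons] at h; exact ih h
    · simp only [leadRun, if_neg hy, List.drop_zero, List.head?_cons,
        Option.some.injEq] at h
      exact h ▸ hy

lemma scanRuns_eq_flatMap (l : List Char) (i : Int) :
    scanRuns l i = (runsSpec l i).flatMap qual := by
  induction l, i using scanRuns.induct with
  | case1 i => simp [scanRuns, runsSpec]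
  | case2 c rest i k ih =>
    rw [scanRuns, runsSpec]
    simp only [List.flatMap_cons]
    have ih' : scanRuns (List.drop (leadRun c rest) rest) (i + (leadRun c rest : Int) + 1)
        = List.flatMap qual (runsSpec (List.drop (leadRun c rest) rest) (i + (leadRun c rest : Int) + 1)) := ih
    rw [ih']
    congr 1
    simp only [qual]
    by_cases hc : c ≠ '-' ∧ (leadRun c rest : Int) + 1 ≥ SAME_BALLS
    · rw [if_pos hc, if_pos (by refine ⟨hc.1, ?_⟩; have := hc.2; simp only [SAME_BALLS] at this; omega)]
    · rw [if_neg hc, if_neg (by simp [SAME_BALLS] at hc ⊢; intro h1; have := hc h1; omega)]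
def stepA (P : Int → Bool) (st : List Int × Bool) (i : Int) : List Int × Bool :=
  if P i then
    let s := if st.2 then st.1 ++ [i, i] else st.1
    (s.dropLast ++ [i], false)
  else (st.1, true)

lemma flatP_append (a b : List (Int × Int)) : flatP (a ++ b) = flatP a ++ flatP b := by
  simp [flatP]

lemma fold_sim (P : Int → Bool) (l : List Int) :
    ∀ (acc : List (Int × Int)) (cur : Option (Int × Int)),
    l.foldl (stepA P) (flatP acc ++ flatP cur.toList, cur.isNone) =
      (flatP (l.foldl (stepPair P) (acc, cur)).1 ++ flatP (l.foldl (stepPair P) (acc, cur)).2.toList,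
       (l.foldl (stepPair P) (acc, cur)).2.isNone) := by
  induction l with
  | nil => intro acc cur; simp
  | cons i l ih =>
    intro acc cur
    simp only [List.foldl_cons]
    have hstep : stepA P (flatP acc ++ flatP cur.toList, cur.isNone) i =
        (flatP (stepPair P (acc, cur) i).1 ++ flatP (stepPair P (acc, cur) i).2.toList,
         (stepPair P (acc, cur) i).2.isNone) := by
      cases hP : P i <;> cases cur with
      | none => simp [stepA, stepPair, hP, flatP]
      | some q =>
          simp [stepA, stepPair, hP, flatP]
    rw [hstep]
    exact ih _ _
-- a block of consecutive hits extends the open run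
lemma fold_allP_some (P : Int → Bool) (n : Nat) :
    ∀ (a : Int) (acc : List (Int × Int)) (q : Int × Int),
    (∀ i, a ≤ i → i < a + n → P i = true) →
    (PySem.List.pyRange a (a + n) 1).foldl (stepPair P) (acc, some q) =
      (acc, some (q.1, if n = 0 then q.2 else a + n - 1)) := by
  induction n with
  | zero => intro a acc q _; simp [PySem.List.pyRange_one_eq_nil]
  | succ m ih =>
    intro a acc q hall
    rw [PySem.List.pyRange_one_cons (by omega)]
    simp only [List.foldl_cons]
    have hPa : P a = true := hall a le_rfl (by omega)
    have : stepPair P (acc, some q) a = (acc, some (q.1, a)) := by simp [stepPair, hPa]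
    rw [this]
    have := ih (a + 1) acc (q.1, a) (fun i h1 h2 => hall i (by omega) (by omega))
    rw [show a + (m + 1 : Nat) = a + 1 + (m : Nat) by push_cast; ring] at *
    rw [this]
    by_cases hm : m = 0 <;> simp [hm]

lemma fold_allP_none (P : Int → Bool) (n : Nat) (a : Int) (acc : List (Int × Int))
    (hn : 0 < n) (hall : ∀ i, a ≤ i → i < a + n → P i = true) :
    (PySem.List.pyRange a (a + n) 1).foldl (stepPair P) (acc, none) =
      (acc, some (a, a + n - 1)) := by
  obtain ⟨m, rfl⟩ : ∃ m, n = m + 1 := ⟨n - 1, by omega⟩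
  rw [PySem.List.pyRange_one_cons (by omega)]
  simp only [List.foldl_cons]
  have hPa : P a = true := hall a le_rfl (by omega)
  have h1 : stepPair P (acc, none) a = (acc, some (a, a)) := by simp [stepPair, hPa]
  rw [h1]
  have := fold_allP_some P m (a + 1) acc (a, a) (fun i h1 h2 => hall i (by omega) (by omega))
  rw [show a + (m + 1 : Nat) = a + 1 + (m : Nat) by push_cast; ring] at *
  rw [this]
  by_cases hm : m = 0 <;> simp [hm]

-- misses keep the accumulator; with no open run the state is unchanged
lemma fold_notP_none (P : Int → Bool) (l : List Int) :
    ∀ acc, (∀ i ∈ l, P i = false) →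
    l.foldl (stepPair P) (acc, none) = (acc, none) := by
  induction l with
  | nil => intro acc _; simp
  | cons i l ih =>
    intro acc hall
    simp only [List.foldl_cons]
    have : stepPair P (acc, none) i = (acc, none) := by
      simp [stepPair, hall i (List.mem_cons_self ..)]
    rw [this]
    exact ih acc (fun j hj => hall j (List.mem_cons_of_mem _ hj))

-- misses only flush: the flattened result is unchanged
lemma fold_notP_final (P : Int → Bool) (l : List Int) :
    ∀ (st : List (Int × Int) × Option (Int × Int)), (∀ i ∈ l, P i = false) →
    (l.foldl (stepPair P) st).1 ++ (l.foldl (stepPair P) st).2.toList = st.1 ++ st.2.toList := by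
  induction l with
  | nil => intro st _; simp
  | cons i l ih =>
    intro st hall
    simp only [List.foldl_cons]
    have h1 : stepPair P st i = (st.1 ++ st.2.toList, none) := by
      simp [stepPair, hall i (List.mem_cons_self ..)]
    rw [h1]
    rw [ih _ (fun j hj => hall j (List.mem_cons_of_mem _ hj))]
    simp
lemma fold_notP_nonempty (P : Int → Bool) (l : List Int) (st : List (Int × Int) × Option (Int × Int))
    (hne : l ≠ []) (hall : ∀ i ∈ l, P i = false) :
    l.foldl (stepPair P) st = (st.1 ++ st.2.toList, none) := by
  cases l with
  | nil => exact absurd rfl hne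
  | cons i l =>
    simp only [List.foldl_cons]
    have h1 : stepPair P st i = (st.1 ++ st.2.toList, none) := by
      simp [stepPair, hall i (List.mem_cons_self ..)]
    rw [h1, fold_notP_none P l _ (fun j hj => hall j (List.mem_cons_of_mem _ hj))]

lemma idx_runs (c : Char) : ∀ (n : Nat) (u : List Char), u.length = n → ∀ (i0 : Int) (P : Int → Bool),
    (∀ k : Nat, k < u.length → P (i0 + k) = decide (u[k]? = some c)) →
    ∀ (acc : List (Int × Int)) (cur : Option (Int × Int)),
    (∀ d rest, u = d :: rest → d = c → cur = none) →
    ((PySem.List.pyRange i0 (i0 + u.length) 1).foldl (stepPair P) (acc, cur)).1 ++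
      ((PySem.List.pyRange i0 (i0 + u.length) 1).foldl (stepPair P) (acc, cur)).2.toList
      = acc ++ cur.toList ++ (runsSpec u i0).filterMap (fun r => if r.1 = c then some r.2 else none) := by
  intro n
  induction n using Nat.strong_induction_on with
  | _ n IH =>
    intro u hlen i0 P hP acc cur hcur
    cases u with
    | nil => simp [runsSpec, PySem.List.pyRange_one_eq_nil]
    | cons d rest =>
      set k := leadRun d rest with hk
      have hkle : k ≤ rest.length := leadRun_le d rest
      have hblock : ∀ j : Nat, j ≤ k → (d :: rest)[j]? = some d := by
        intro j hj
        cases j with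
        | zero => rfl
        | succ m =>
          have h1 : rest[m]? = (rest.take k)[m]? := by
            rw [List.getElem?_take_of_lt (by omega)]
          rw [List.getElem?_cons_succ, h1, leadRun_take, List.getElem?_replicate]
          simp; omega
      have hsplit : PySem.List.pyRange i0 (i0 + (d :: rest).length) 1 =
          PySem.List.pyRange i0 (i0 + (k + 1 : Nat)) 1 ++
          PySem.List.pyRange (i0 + (k + 1 : Nat)) (i0 + (d :: rest).length) 1 := by
        rw [PySem.List.pyRange_one_append] <;> simp <;> omega
      rw [hsplit, List.foldl_append]
      have hrs : runsSpec (d :: rest) i0 = (d, i0, i0 + k) :: runsSpec (rest.drop k) (i0 + (k : Int) + 1) := by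
        rw [runsSpec]
      -- the recursive call, shared by both cases
      have hrec : ∀ (acc' : List (Int × Int)) (cur' : Option (Int × Int)),
          (∀ d' rest', rest.drop k = d' :: rest' → d' = c → cur' = none) →
          ((PySem.List.pyRange (i0 + (k + 1 : Nat)) (i0 + (d :: rest).length) 1).foldl (stepPair P) (acc', cur')).1 ++
            ((PySem.List.pyRange (i0 + (k + 1 : Nat)) (i0 + (d :: rest).length) 1).foldl (stepPair P) (acc', cur')).2.toList
            = acc' ++ cur'.toList ++ (runsSpec (rest.drop k) (i0 + (k : Int) + 1)).filterMap
                (fun r => if r.1 = c then some r.2 else none) := by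
        intro acc' cur' hcur'
        have hlen' : (rest.drop k).length = rest.length - k := by simp
        have hend : i0 + ((d :: rest).length : Int) = (i0 + (k + 1 : Nat)) + ((rest.drop k).length : Int) := by
          simp; omega
        have hstart : (i0 + ((k + 1 : Nat) : Int)) = i0 + (k : Int) + 1 := by push_cast; ring
        rw [hend, hstart]
        exact IH (rest.length - k) (by simp at hlen; omega) (rest.drop k) hlen' _ P
          (by
            intro j hj
            have h1 : i0 + (k : Int) + 1 + j = i0 + ((k + 1 + j : Nat) : Int) := by push_cast; ring
            rw [h1, hP (k + 1 + j) (by simp at hj ⊢; omega)]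
            rw [List.getElem?_drop, show k + 1 + j = (k + j) + 1 from by omega,
              List.getElem?_cons_succ])
          acc' cur' hcur'
      by_cases hd : d = c
      · have hcurnone : cur = none := hcur d rest rfl hd
        subst hcurnone
        have hfirst : (PySem.List.pyRange i0 (i0 + ((k + 1 : Nat) : Int)) 1).foldl (stepPair P) (acc, none)
            = (acc, some (i0, i0 + ((k + 1 : Nat) : Int) - 1)) := by
          apply fold_allP_none P (k + 1) i0 acc (by omega)
          intro i h1 h2
          have hj : (i - i0).toNat ≤ k := by omega
          have h3 : i = i0 + ((i - i0).toNat : Int) := by omega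
          rw [h3, hP _ (by simp; omega)]
          simp only [hd] at hblock ⊢
          simp [hblock _ hj]
        rw [hfirst]
        rw [hrec acc (some (i0, i0 + ((k + 1 : Nat) : Int) - 1))
          (by
            intro d' rest' heq hd'c
            exfalso
            have hne : d' ≠ d := by
              apply leadRun_drop_head d rest
              rw [← hk, heq]; simp
            exact hne (hd'c.trans hd.symm))]
        rw [hrs]
        simp only [List.filterMap_cons, if_pos hd]
        have he : i0 + ((k + 1 : Nat) : Int) - 1 = i0 + (k : Int) := by push_cast; ring
        rw [he]
        simp
      · have hfirst : (PySem.List.pyRange i0 (i0 + ((k + 1 : Nat) : Int)) 1).foldl (stepPair P) (acc, cur)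
            = (acc ++ cur.toList, none) := by
          apply fold_notP_nonempty
          · have hlen2 : (PySem.List.pyRange i0 (i0 + ((k + 1 : Nat) : Int)) 1).length = k + 1 := by
              rw [PySem.List.length_pyRange_one]; omega
            intro hnil; rw [hnil] at hlen2; simp at hlen2
          · intro i hi
            rw [PySem.List.mem_pyRange_one] at hi
            have hj : (i - i0).toNat ≤ k := by omega
            have h3 : i = i0 + ((i - i0).toNat : Int) := by omega
            rw [h3, hP _ (by simp; omega)]
            simp [hblock _ hj, hd]
        rw [hfirst]
        rw [hrec (acc ++ cur.toList) none (by intro _ _ _ _; rfl)]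
        rw [hrs]
        simp only [List.filterMap_cons, if_neg hd]
        simp
def normSfun (s : List Int) : List (Int × Int) :=
  (PySem.List.pyRange 0 (s.length : Int) 2).foldl
    (fun acc i => acc ++ [(PySem.List.pyGetD s i 0, PySem.List.pyGetD s (i + 1) 0)]) []

lemma flatP_nil : flatP [] = [] := rfl

lemma flatP_length (ps : List (Int × Int)) : (flatP ps).length = 2 * ps.length := by
  induction ps with
  | nil => simp [flatP]
  | cons p ps ih => simp [flatP] at ih ⊢; omega

lemma pyRange_two (m : Nat) :
    PySem.List.pyRange 0 (2 * (m : Int)) 2 = (List.range m).map (fun k : Nat => (2 : Int) * (k : Int)) := by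
  rw [PySem.List.pyRange_of_pos _ _ (by norm_num)]
  rcases Nat.eq_zero_or_pos m with hm | hm
  · simp [hm]
  · rw [if_pos (by push_cast; omega)]
    have h1 : ((2 * (m : Int) - 0 + 2 - 1) / 2).toNat = m := by omega
    rw [h1]
    simp only [zero_add]

lemma pyRange_two_snoc (m : Nat) :
    PySem.List.pyRange 0 (2 * ((m : Int) + 1)) 2 =
      PySem.List.pyRange 0 (2 * (m : Int)) 2 ++ [2 * (m : Int)] := by
  have h1 : (2 : Int) * ((m : Int) + 1) = 2 * ((m + 1 : Nat) : Int) := by push_cast; ring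
  rw [h1, pyRange_two, pyRange_two, List.range_succ]
  simp

lemma pyGetD_append_left (u v : List Int) (i : Int) (h0 : 0 ≤ i) (h1 : i < u.length) :
    PySem.List.pyGetD (u ++ v) i 0 = PySem.List.pyGetD u i 0 := by
  rw [PySem.List.pyGetD_of_nonneg _ _ h0, PySem.List.pyGetD_of_nonneg _ _ h0]
  have h2 : i.toNat < u.length := by omega
  simp [List.getD, List.getElem?_append_left h2]

lemma normS_flatP (ps : List (Int × Int)) : normSfun (flatP ps) = ps := by
  induction ps using List.reverseRecOn with
  | nil =>
    have h0 : PySem.List.pyRange 0 (0 : Int) 2 = [] := by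
      rw [PySem.List.pyRange_of_pos _ _ (by norm_num)]; simp
    simp [normSfun, flatP, h0]
  | append_singleton ps p ih =>
    obtain ⟨a, b⟩ := p
    have hflat : flatP (ps ++ [(a, b)]) = flatP ps ++ [a, b] := flatP_append ps [(a, b)]
    have hlen : ((flatP (ps ++ [(a, b)])).length : Int) = 2 * ((ps.length : Int) + 1) := by
      rw [flatP_length]; simp [List.length_append]
    rw [normSfun, hlen, pyRange_two_snoc, List.foldl_append]
    have hlen2 : ((flatP ps).length : Int) = 2 * (ps.length : Int) := by
      rw [flatP_length]; push_cast; ring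
    have hcongr : (PySem.List.pyRange 0 (2 * (ps.length : Int)) 2).foldl
        (fun acc i => acc ++ [(PySem.List.pyGetD (flatP (ps ++ [(a, b)])) i 0,
          PySem.List.pyGetD (flatP (ps ++ [(a, b)])) (i + 1) 0)]) []
        = (PySem.List.pyRange 0 (2 * (ps.length : Int)) 2).foldl
        (fun acc i => acc ++ [(PySem.List.pyGetD (flatP ps) i 0,
          PySem.List.pyGetD (flatP ps) (i + 1) 0)]) [] := by
      apply PySem.List.foldl_congr_mem
      intro acc i hi
      rw [PySem.List.mem_pyRange_iff_of_pos (by norm_num)] at hi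
      obtain ⟨hi0, hi1, hi2⟩ := hi
      have hieven : ∃ j : Int, i = 2 * j := by
        obtain ⟨j, hj⟩ := hi2; exact ⟨j, by omega⟩
      obtain ⟨j, rfl⟩ := hieven
      rw [hflat, pyGetD_append_left _ _ _ (by omega) (by rw [flatP_length]; omega),
        pyGetD_append_left _ _ _ (by omega) (by rw [flatP_length]; omega)]
    rw [hcongr]
    simp only [List.foldl_cons, List.foldl_nil]
    have hix : PySem.List.pyGetD (flatP (ps ++ [(a, b)])) (2 * (ps.length : Int)) 0 = a := by
      rw [hflat, PySem.List.pyGetD_of_nonneg _ _ (by omega)]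
      have : (2 * (ps.length : Int)).toNat = (flatP ps).length := by rw [flatP_length]; omega
      rw [this]
      simp [List.getD, List.getElem?_append_right (le_refl (flatP ps).length)]
    have hiy : PySem.List.pyGetD (flatP (ps ++ [(a, b)])) (2 * (ps.length : Int) + 1) 0 = b := by
      rw [hflat, PySem.List.pyGetD_of_nonneg _ _ (by omega)]
      have h3 : (2 * (ps.length : Int) + 1).toNat = (flatP ps).length + 1 := by rw [flatP_length]; omega
      rw [h3]
      simp [List.getD, List.getElem?_append_right (Nat.le_succ_of_le (le_refl (flatP ps).length))]
    rw [hix, hiy]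
    have : (PySem.List.pyRange 0 (2 * (ps.length : Int)) 2).foldl
        (fun acc i => acc ++ [(PySem.List.pyGetD (flatP ps) i 0,
          PySem.List.pyGetD (flatP ps) (i + 1) 0)]) [] = ps := by
      have h4 := ih
      rw [normSfun, hlen2] at h4
      exact h4
    simp [this]
lemma pyGet?_zero {α : Type} (l : List α) (h : l ≠ []) : PySem.List.pyGet? l 0 = some (l.head h) := by
  cases l with
  | nil => exact absurd rfl h
  | cons x xs => simp [PySem.List.pyGet?, PySem.List.pyIdx?]

lemma pyGet?_neg_one {α : Type} (l : List α) (h : l ≠ []) :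
    PySem.List.pyGet? l (-1) = some (l.getLast h) := by
  have hl : 0 < l.length := List.length_pos_iff.mpr h
  simp [PySem.List.pyGet?, PySem.List.pyIdx?, show ¬ ((0:Int) ≤ -1) by norm_num,
    show -(l.length : Int) ≤ -1 by omega]
  have h1 : l.length - 1 < l.length := by omega
  rw [List.getElem?_eq_getElem h1]
  rw [List.getLast_eq_getElem]
lemma pairwise_le_getLast (l : List (Int × Char)) (hp : l.Pairwise (fun a b => a.1 < b.1))
    (h : l ≠ []) : ∀ p ∈ l, p.1 ≤ (l.getLast h).1 := by
  induction l with
  | nil => simp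
  | cons x xs ih =>
    intro p hp'
    rcases List.mem_cons.mp hp' with rfl | hmem
    · cases xs with
      | nil => simp
      | cons y ys =>
        have h1 : p.1 < y.1 := (List.pairwise_cons.mp hp).1 y (List.mem_cons_self ..)
        have h2 := ih (List.pairwise_cons.mp hp).2 (by simp) y (List.mem_cons_self ..)
        rw [List.getLast_cons (by simp)]
        omega
    · have hxs : xs ≠ [] := List.ne_nil_of_mem hmem
      rw [List.getLast_cons hxs]
      exact ih (List.pairwise_cons.mp hp).2 hxs p hmem

lemma head_le_of_pairwise (l : List (Int × Char)) (hp : l.Pairwise (fun a b => a.1 < b.1))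
    (h : l ≠ []) : ∀ p ∈ l, (l.head h).1 ≤ p.1 := by
  cases l with
  | nil => simp
  | cons x xs =>
    intro p hp'
    rcases List.mem_cons.mp hp' with rfl | hmem
    · simp
    · exact le_of_lt ((List.pairwise_cons.mp hp).1 p hmem)

lemma fasStep_of_mem (t : List Char) (c : Char) (hc : c ∈ t) (hcm : c ≠ '-')
    (res : PySem.Dict Char (List (Int × Int))) :
    fasStep t res c = res.insert c (pairsOf t c) := by
  rw [fasStep, if_neg hcm]
  set z := (PySem.List.enumerate t 0).filter (fun x => x.2 == c) with hzdef
  -- shape of z's elements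
  have hz_shape : ∀ p ∈ z, 0 ≤ p.1 ∧ t[p.1.toNat]? = some c ∧ p.2 = c := by
    intro p hpz
    rw [hzdef, List.mem_filter, PySem.List.mem_enumerate_iff] at hpz
    obtain ⟨⟨k, hk, rfl⟩, hbeq⟩ := hpz
    simp only [beq_iff_eq] at hbeq
    refine ⟨by simp, ?_, hbeq⟩
    simp only [zero_add, Int.toNat_natCast]
    rw [List.getElem?_eq_getElem hk, hbeq]
  have hmemz : ∀ i : Int, ((i, c) ∈ z ↔ 0 ≤ i ∧ t[i.toNat]? = some c) := by
    intro i
    constructor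
    · intro hi; exact ⟨(hz_shape _ hi).1, (hz_shape _ hi).2.1⟩
    · rintro ⟨hi0, hi1⟩
      rw [hzdef, List.mem_filter, PySem.List.mem_enumerate_iff]
      obtain ⟨hk, hget⟩ := List.getElem?_eq_some_iff.mp hi1
      exact ⟨⟨i.toNat, hk, by simp [hget, hi0]⟩, by simp⟩
  -- z is nonempty
  obtain ⟨k0, hk0, hk0e⟩ := List.mem_iff_getElem.mp hc
  have hzne : z ≠ [] := by
    apply List.ne_nil_of_mem (a := ((k0 : Int), c))
    rw [hmemz]
    refine ⟨by omega, ?_⟩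
    simp only [Int.toNat_natCast]
    rw [List.getElem?_eq_getElem hk0, hk0e]
  simp only []
  rw [pyGet?_zero z hzne, pyGet?_neg_one z hzne]
  set z0 := z.head hzne with hz0def
  set zl := z.getLast hzne with hzldef
  have hpz : z.Pairwise (fun a b => a.1 < b.1) :=
    (PySem.List.pairwise_lt_enumerate t 0).sublist (List.filter_sublist)
  have hmin : ∀ p ∈ z, z0.1 ≤ p.1 := head_le_of_pairwise z hpz hzne
  have hmax : ∀ p ∈ z, p.1 ≤ zl.1 := pairwise_le_getLast z hpz hzne
  have hz0mem : z0 ∈ z := List.head_mem hzne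
  have hzlmem : zl ∈ z := List.getLast_mem hzne
  have hz00 : 0 ≤ z0.1 := (hz_shape _ hz0mem).1
  have hzl1 : zl.1 < t.length := by
    have h1 := (hz_shape _ hzlmem).2.1
    have h0 := (hz_shape _ hzlmem).1
    obtain ⟨h2, -⟩ := List.getElem?_eq_some_iff.mp h1
    omega
  have hz0zl : z0.1 ≤ zl.1 := hmax _ hz0mem
  set P : Int → Bool := fun i => z.contains (i, c) with hPdef
  have hPc : ∀ i : Int, P i = true ↔ ((i, c) ∈ z) := by
    intro i; rw [hPdef]; exact List.contains_iff_mem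
  have hPfalse : ∀ i : Int, ¬ ((i, c) ∈ z) → P i = false := by
    intro i hi
    rw [← Bool.not_eq_true, hPc]; exact hi
  have hP' : ∀ k : Nat, k < t.length → P (0 + (k : Int)) = decide (t[k]? = some c) := by
    intro k hk
    by_cases hk2 : t[k]? = some c
    · rw [decide_eq_true hk2, (hPc _).mpr]
      rw [hmemz]
      constructor; omega
      simpa using hk2
    · rw [decide_eq_false hk2]
      apply hPfalse
      rw [hmemz]
      intro hcon
      exact hk2 (by simpa using hcon.2)
  -- the A-side fold in pair form
  set R := (PySem.List.pyRange z0.1 (zl.1 + 1) 1).foldl (stepPair P) ([], none) with hRdef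
  have hsim := fold_sim P (PySem.List.pyRange z0.1 (zl.1 + 1) 1) [] none
  simp only [flatP_nil, List.nil_append, Option.toList_none, Option.isNone_none] at hsim
  -- extend the fold to the full index range
  have hfull := idx_runs c t.length t rfl 0 P hP' [] none (fun _ _ _ _ => rfl)
  have hsplit : PySem.List.pyRange 0 (0 + (t.length : Int)) 1 =
      PySem.List.pyRange 0 z0.1 1 ++ PySem.List.pyRange z0.1 (zl.1 + 1) 1 ++
      PySem.List.pyRange (zl.1 + 1) (0 + (t.length : Int)) 1 := by
    rw [List.append_assoc,
      ← PySem.List.pyRange_one_append z0.1 (zl.1 + 1) _ (by omega) (by omega),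
      ← PySem.List.pyRange_one_append 0 z0.1 _ (by omega) (by omega)]
  rw [hsplit, List.foldl_append, List.foldl_append] at hfull
  have hpre : (PySem.List.pyRange 0 z0.1 1).foldl (stepPair P) ([], none) = ([], none) := by
    apply fold_notP_none
    intro i hi
    rw [PySem.List.mem_pyRange_one] at hi
    apply hPfalse
    intro hcon
    have := hmin _ hcon
    omega
  rw [hpre] at hfull
  have hsuf : ((PySem.List.pyRange (zl.1 + 1) (0 + (t.length : Int)) 1).foldl (stepPair P) R).1 ++
      ((PySem.List.pyRange (zl.1 + 1) (0 + (t.length : Int)) 1).foldl (stepPair P) R).2.toList =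
      R.1 ++ R.2.toList := by
    apply fold_notP_final
    intro i hi
    rw [PySem.List.mem_pyRange_one] at hi
    apply hPfalse
    intro hcon
    have := hmax _ hcon
    omega
  rw [← hRdef, hsuf] at hfull
  simp only [List.nil_append, Option.toList_none, List.append_nil] at hfull
  -- hfull : R.1 ++ R.2.toList = pairsOf t c
  have hs : ((PySem.List.pyRange z0.1 (zl.1 + 1) 1).foldl (stepA P) ([], true)).1
      = flatP (pairsOf t c) := by
    rw [hsim, ← hRdef]
    have : flatP R.1 ++ flatP R.2.toList = flatP (R.1 ++ R.2.toList) := (flatP_append _ _).symm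
    rw [show (flatP R.1 ++ flatP R.2.toList, R.2.isNone).1 = flatP R.1 ++ flatP R.2.toList from rfl,
      this, hfull, pairsOf]
  show res.insert c ((PySem.List.pyRange 0
      ((((PySem.List.pyRange z0.1 (zl.1 + 1) 1).foldl (stepA P) ([], true)).1.length : Nat) : Int) 2).foldl
      (fun acc i => acc ++ [(PySem.List.pyGetD ((PySem.List.pyRange z0.1 (zl.1 + 1) 1).foldl (stepA P) ([], true)).1 i 0,
        PySem.List.pyGetD ((PySem.List.pyRange z0.1 (zl.1 + 1) 1).foldl (stepA P) ([], true)).1 (i + 1) 0)]) [])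
      = res.insert c (pairsOf t c)
  rw [hs]
  rw [show (PySem.List.pyRange 0 (((flatP (pairsOf t c)).length : Nat) : Int) 2).foldl
      (fun acc i => acc ++ [(PySem.List.pyGetD (flatP (pairsOf t c)) i 0,
        PySem.List.pyGetD (flatP (pairsOf t c)) (i + 1) 0)]) [] = normSfun (flatP (pairsOf t c)) from rfl]
  rw [normS_flatP]
lemma fas_items (t : List Char) :
    (find_all_substrings t).items =
      ((PySem.Set.ofList t).filter (fun c => decide ¬(c = '-'))).map (fun c => (c, pairsOf t c)) := by
  rw [find_all_substrings,
    PySem.List.foldl_congr_mem (PySem.Set.ofList t) (fasStep t)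
      (fun res c => if ¬ (c = '-') then res.insert c (pairsOf t c) else res) PySem.Dict.empty
      (by
        intro acc c hcmem
        by_cases hc : c = '-'
        · simp [fasStep, hc]
        · show fasStep t acc c = if ¬ (c = '-') then acc.insert c (pairsOf t c) else acc
          rw [if_pos hc, fasStep_of_mem t c ((PySem.Set.mem_ofList t c).mp hcmem) hc])]
  rw [PySem.List.foldl_ite_eq_foldl_filter (fun c : Char => ¬ (c = '-'))
      (fun (res : PySem.Dict Char (List (Int × Int))) (c : Char) => res.insert c (pairsOf t c))]
  rw [PySem.Dict.items_foldl_insert_fresh _ (fun c => c) (fun c => pairsOf t c) PySem.Dict.empty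
    (by intro a _; simp) (by simpa using ((PySem.Set.nodup_ofList t).filter _))]
  simp [PySem.Dict.empty]

lemma fas_keys (t : List Char) :
    (find_all_substrings t).keys = (PySem.Set.ofList t).filter (fun c => decide ¬(c = '-')) := by
  rw [PySem.Dict.keys, fas_items, List.map_map]
  exact List.map_id _

lemma fas_getD (t : List Char) (c : Char)
    (hc : c ∈ (PySem.Set.ofList t).filter (fun c => decide ¬(c = '-'))) :
    (find_all_substrings t).getD c [] = pairsOf t c := by
  apply PySem.Dict.getD_of_mem_items
  · rw [fas_items]
    exact List.mem_map.mpr ⟨c, hc, rfl⟩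
  · rw [fas_keys]
    exact (PySem.Set.nodup_ofList t).filter _
def hFun (p : Int × Int) : List Int :=
  if p.2 - p.1 + 1 ≥ SAME_BALLS then PySem.List.pyRange p.1 (p.2 + 1) 1 else []

lemma qual_eq_hFun (r : Char × Int × Int) (h : r.1 ≠ '-') : qual r = hFun r.2 := by
  simp only [qual, hFun, SAME_BALLS]
  by_cases hc : r.2.2 - r.2.1 + 1 ≥ 5
  · rw [if_pos ⟨h, hc⟩, if_pos hc]
  · rw [if_neg (by tauto), if_neg hc]

lemma qual_ne_nil (r : Char × Int × Int) (h : qual r ≠ []) :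
    r.1 ≠ '-' ∧ r.2.2 - r.2.1 + 1 ≥ 5 := by
  by_contra hcon
  exact h (by simp only [qual, if_neg hcon])

lemma run_infix (l : List Char) (i : Int) (r : Char × Int × Int) (hr : r ∈ runsSpec l i) :
    ∃ k : Nat, r.2.2 = r.2.1 + k ∧ List.replicate (k + 1) r.1 <:+: l := by
  induction l, i using runsSpec.induct generalizing r with
  | case1 i => simp [runsSpec] at hr
  | case2 c rest i k ih =>
    rw [runsSpec] at hr
    rcases List.mem_cons.mp hr with rfl | hmem
    · refine ⟨leadRun c rest, rfl, ?_⟩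
      apply List.IsPrefix.isInfix
      have : List.replicate (leadRun c rest + 1) c = c :: rest.take (leadRun c rest) := by
        rw [leadRun_take, List.replicate_succ]
      rw [this]
      exact ⟨rest.drop (leadRun c rest), by simp⟩
    · have ih2 := ih r hmem
      obtain ⟨m, hm1, hm2⟩ := ih2
      refine ⟨m, hm1, hm2.trans ?_⟩
      exact ((List.drop_suffix _ _).trans (List.suffix_cons _ _)).isInfix

lemma qual_run_infix (l : List Char) (r : Char × Int × Int) (hr : r ∈ runsSpec l 0)
    (hq : qual r ≠ []) : r.1 ≠ '-' ∧ List.replicate 5 r.1 <:+: l ∧ r.1 ∈ l := by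
  obtain ⟨hne, hlen⟩ := qual_ne_nil r hq
  obtain ⟨k, hk1, hk2⟩ := run_infix l 0 r hr
  have hk5 : 5 ≤ k + 1 := by omega
  have hpre : List.replicate 5 r.1 <+: List.replicate (k + 1) r.1 := by
    have := List.take_prefix 5 (List.replicate (k + 1) r.1)
    rwa [List.take_replicate, min_eq_left hk5] at this
  have hinf : List.replicate 5 r.1 <:+: l := (hpre.isInfix).trans hk2
  refine ⟨hne, hinf, ?_⟩
  have : r.1 ∈ List.replicate 5 r.1 := by simp
  exact hinf.sublist.mem this

lemma flatMap_congr_mem {α β : Type} (l : List α) (f g : α → List β)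
    (h : ∀ x ∈ l, f x = g x) : l.flatMap f = l.flatMap g := by
  induction l with
  | nil => rfl
  | cons x xs ih =>
    simp only [List.flatMap_cons]
    rw [h x (List.mem_cons_self ..), ih (fun y hy => h y (List.mem_cons_of_mem _ hy))]

lemma flatMap_single {α β : Type} (K : List α) (g : α → List β) (c0 : α)
    (hn : K.Nodup) (hc0 : c0 ∈ K) (hz : ∀ c ∈ K, c ≠ c0 → g c = []) :
    K.flatMap g = g c0 := by
  induction K with
  | nil => simp at hc0
  | cons x xs ih =>
    simp only [List.flatMap_cons]
    rcases List.mem_cons.mp hc0 with rfl | hmem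
    · have : xs.flatMap g = [] := by
        apply List.flatMap_eq_nil_iff.mpr
        intro c hc
        exact hz c (List.mem_cons_of_mem _ hc) (fun hceq => (List.nodup_cons.mp hn).1 (hceq ▸ hc))
      rw [this, List.append_nil]
    · rw [hz x (List.mem_cons_self ..) (fun hxe => (List.nodup_cons.mp hn).1 (hxe ▸ hmem)),
        List.nil_append]
      exact ih (List.nodup_cons.mp hn).2 hmem
        (fun c hc => hz c (List.mem_cons_of_mem _ hc))

lemma flatMap_filterMap_if (l : List (Char × Int × Int)) (c : Char) :
    ((l.filterMap (fun r => if r.1 = c then some r.2 else none)).flatMap hFun)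
      = l.flatMap (fun r => if r.1 = c then hFun r.2 else []) := by
  induction l with
  | nil => rfl
  | cons r rs ih =>
    by_cases hrc : r.1 = c
    · simp only [List.filterMap_cons, if_pos hrc, List.flatMap_cons, ih]
    · simp only [List.filterMap_cons, if_neg hrc, List.flatMap_cons, ih, List.nil_append]
lemma main_equal (t : List Char)
    (hpre : ∀ c ∈ t, ∀ d ∈ t, c ≠ '-' → d ≠ '-' →
      List.replicate 5 c <:+: t → List.replicate 5 d <:+: t → c = d) :
    ((find_all_substrings t).keys.foldl (fun v x =>
      ((find_all_substrings t).getD x []).foldl (fun v p =>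
        if p.2 - p.1 + 1 ≥ SAME_BALLS then
          (PySem.List.pyRange p.1 (p.2 + 1) 1).foldl (fun v idx => v ++ [idx]) v
        else v) v) []) = scanRuns t 0 := by
  set K := (PySem.Set.ofList t).filter (fun c => decide ¬(c = '-')) with hKdef
  have hKmem : ∀ c ∈ K, c ∈ t ∧ c ≠ '-' := by
    intro c hc
    rw [hKdef, List.mem_filter] at hc
    exact ⟨(PySem.Set.mem_ofList t c).mp hc.1, by simpa using hc.2⟩
  -- rewrite A's nested folds into a flatMap over K
  have houter : ((find_all_substrings t).keys.foldl (fun v x =>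
      ((find_all_substrings t).getD x []).foldl (fun v p =>
        if p.2 - p.1 + 1 ≥ SAME_BALLS then
          (PySem.List.pyRange p.1 (p.2 + 1) 1).foldl (fun v idx => v ++ [idx]) v
        else v) v) [])
      = K.flatMap (fun c => (runsSpec t 0).flatMap (fun r => if r.1 = c then hFun r.2 else [])) := by
    rw [fas_keys, ← hKdef]
    rw [PySem.List.foldl_congr_mem K _ (fun v c => v ++ ((runsSpec t 0).flatMap
        (fun r => if r.1 = c then hFun r.2 else []))) []
      (by
        intro acc c hc
        rw [fas_getD t c (hKdef ▸ hc)]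
        rw [PySem.List.foldl_congr_mem (pairsOf t c) _ (fun v p => v ++ hFun p) acc
          (by
            intro v p _
            show (if p.2 - p.1 + 1 ≥ SAME_BALLS then
                (PySem.List.pyRange p.1 (p.2 + 1) 1).foldl (fun v idx => v ++ [idx]) v
              else v) = v ++ hFun p
            rw [hFun]
            by_cases hp : p.2 - p.1 + 1 ≥ SAME_BALLS
            · rw [if_pos hp, if_pos hp, PySem.List.foldl_append_singleton_eq_self]
            · rw [if_neg hp, if_neg hp, List.append_nil])]
        rw [PySem.List.foldl_append_eq_flatMap]
        rw [pairsOf, flatMap_filterMap_if])]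
    rw [PySem.List.foldl_append_eq_flatMap, List.nil_append]
  rw [houter, scanRuns_eq_flatMap]
  by_cases hq : ∀ r ∈ runsSpec t 0, qual r = []
  · rw [List.flatMap_eq_nil_iff.mpr (by
      intro c hc
      apply List.flatMap_eq_nil_iff.mpr
      intro r hr
      by_cases hrc : r.1 = c
      · rw [if_pos hrc, ← qual_eq_hFun r (hrc ▸ (hKmem c hc).2), hq r hr]
      · rw [if_neg hrc])]
    rw [List.flatMap_eq_nil_iff.mpr hq]
  · push_neg at hq
    obtain ⟨r0, hr0mem, hr0⟩ := hq
    obtain ⟨hr0ne, hr0inf, hr0t⟩ := qual_run_infix t r0 hr0mem hr0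
    set c0 := r0.1 with hc0def
    have huniq : ∀ r ∈ runsSpec t 0, qual r ≠ [] → r.1 = c0 := by
      intro r hr hrq
      obtain ⟨hne, hinf, hmem⟩ := qual_run_infix t r hr hrq
      exact hpre r.1 hmem c0 hr0t hne hr0ne hinf hr0inf
    have hc0K : c0 ∈ K := by
      rw [hKdef, List.mem_filter]
      exact ⟨(PySem.Set.mem_ofList t c0).mpr hr0t, by simpa using hr0ne⟩
    have hKnodup : K.Nodup := (PySem.Set.nodup_ofList t).filter _
    rw [flatMap_single K _ c0 hKnodup hc0K
      (by
        intro c hc hcne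
        apply List.flatMap_eq_nil_iff.mpr
        intro r hr
        by_cases hrc : r.1 = c
        · rw [if_pos hrc]
          have hqr : qual r = [] := by
            by_contra hqr
            exact hcne ((hrc.symm.trans (huniq r hr hqr)))
          rw [← qual_eq_hFun r (hrc ▸ (hKmem c hc).2), hqr]
        · rw [if_neg hrc])]
    apply flatMap_congr_mem
    intro r hr
    by_cases hrc : r.1 = c0
    · rw [if_pos hrc, qual_eq_hFun r (hrc ▸ hr0ne)]
    · rw [if_neg hrc]
      by_contra hqr
      exact hrc (huniq r hr (fun h => hqr h.symm))

-- ===== VERDICT (by name: the statement is the Claim_ definition above) =====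
lemma eq_of_len_le_one {α : Type} (L : List α) (c d : α) (h : L.length ≤ 1)
    (hc : c ∈ L) (hd : d ∈ L) : c = d := by
  match L with
  | [] => simp at hc
  | [x] => simp at hc hd; rw [hc, hd]
  | x :: y :: _ => simp at h

theorem check_vector_spec : Claim_equal_check_vector := by
  intro vec _hdom hpre
  show check_vector vec = check_vector_alt vec
  apply main_equal (normChars vec)
  intro c hc d hd hcne hdne hcinf hdinf
  have hmem : ∀ e, e ∈ normChars vec → e ≠ '-' → List.replicate 5 e <:+: normChars vec →
      e ∈ (PySem.Set.ofList (normChars vec)).filter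
        (fun c => c != '-' && PySem.Chars.isIn (List.replicate 5 c) (normChars vec)) := by
    intro e he hene heinf
    rw [List.mem_filter]
    refine ⟨(PySem.Set.mem_ofList _ e).mpr he, ?_⟩
    rw [Bool.and_eq_true, bne_iff_ne]
    exact ⟨hene, (PySem.Chars.isIn_iff_infix _ _).mpr heinf⟩
  exact eq_of_len_le_one _ c d hpre (hmem c hc hcne hcinf) (hmem d hd hdne hdinf)
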